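-- pv_equiv track=rewrite | github.com/stevefan/drydock | tests/test_create_flow.py | _find_last_json_block
-- ===== SOURCE A (Python) =====
-- def _find_last_json_block(lines):
--     """Find the last JSON object in output (may have multiple JSON outputs)."""
--     brace_depth = 0
--     block_lines = []
--     in_block = False
--
--     for line in reversed(lines):
--         stripped = line.strip()
--         brace_depth += stripped.count("}") - stripped.count("{")
--         block_lines.append(line)
--         if brace_depth <= 0 and "{" in stripped:
--             break
--
--     block_lines.reverse()
--     return block_lines
-- ===== SOURCE B (Python) =====
-- def _find_last_json_block(lines):
--     """Find the last JSON object in output (may have multiple JSON outputs)."""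
--     stripped = [line.strip() for line in lines]
--     deltas = [s.count("}") - s.count("{") for s in stripped]
--     total = sum(deltas)
--     start = 0
--     prefix = 0
--     for i, (s, d) in enumerate(zip(stripped, deltas)):
--         if total - prefix <= 0 and "{" in s:
--             start = i
--         prefix += d
--     return lines[start:]
-- ===== Notes on version B (the rewrite author's own statement) =====
-- stated objective: alternative
-- what changed: Replaced the reverse accumulate-append-break-then-reverse scan with a forward table-then-scan: precompute per-line brace deltas and their total, make one forward pass with a running prefix sum recording the last index whose suffix balance is <= 0 and whose stripped line contains '{', and return lines[start:].
import Mathlib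
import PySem

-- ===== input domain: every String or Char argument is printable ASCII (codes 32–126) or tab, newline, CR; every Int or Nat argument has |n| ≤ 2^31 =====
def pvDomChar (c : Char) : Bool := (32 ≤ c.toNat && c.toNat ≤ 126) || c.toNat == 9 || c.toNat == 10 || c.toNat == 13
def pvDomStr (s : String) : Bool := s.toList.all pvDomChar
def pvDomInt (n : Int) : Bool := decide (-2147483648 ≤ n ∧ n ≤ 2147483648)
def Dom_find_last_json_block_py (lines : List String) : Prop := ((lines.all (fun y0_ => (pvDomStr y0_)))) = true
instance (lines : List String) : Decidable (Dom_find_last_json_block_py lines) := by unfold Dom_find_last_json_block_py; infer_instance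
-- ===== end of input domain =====

-- B replaces A's reverse scan-with-break by a forward prefix-sum pass over precomputed
-- brace deltas (alternative decomposition, same cost); return values proved equal on all inputs.

-- ===== PORT A =====
-- the reversed(lines) loop: state = (brace_depth, block_lines); break returns the accumulator
def pvGoA : List String → Int → List String → List String
  | [], _, acc => acc
  | l :: rest, depth, acc =>
    let stripped := PySem.Str.strip l
    let depth' := depth + ((PySem.Str.count stripped "}" : Int) - (PySem.Str.count stripped "{" : Int))
    let acc' := acc ++ [l]
    if depth' ≤ 0 ∧ PySem.Str.isIn "{" stripped = true then acc'
    else pvGoA rest depth' acc'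

def find_last_json_block_py (lines : List String) : List String :=
  (pvGoA lines.reverse 0 []).reverse

-- ===== PORT B =====
def find_last_json_block_py_alt (lines : List String) : List String :=
  let stripped := lines.map PySem.Str.strip
  let deltas := stripped.map (fun s => ((PySem.Str.count s "}" : Int) - (PySem.Str.count s "{" : Int)))
  let total := deltas.sum
  let r := (PySem.List.enumerate (stripped.zip deltas) 0).foldl
      (fun (acc : Int × Int) p =>
        (acc.1 + p.2.2,
         if total - acc.1 ≤ 0 ∧ PySem.Str.isIn "{" p.2.1 = true then p.1 else acc.2))
      (0, 0)
  PySem.List.slice lines (some r.2) none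

-- ===== PRECONDITION & SPEC =====
def Spec_find_last_json_block_py (lines : List String) (out : List String) : Prop := out = find_last_json_block_py_alt lines
instance (lines : List String) (out : List String) : Decidable (Spec_find_last_json_block_py lines out) := by unfold Spec_find_last_json_block_py; infer_instance

-- ===== CLAIM (what is proved, stated in full; the proofs are below) =====
def Claim_equal_find_last_json_block_py : Prop := ∀ (lines : List String), Dom_find_last_json_block_py lines → Spec_find_last_json_block_py lines (find_last_json_block_py lines)

-- ===== LEMMAS AND PROOFS =====

def pvDelta (s : String) : Int := (PySem.Str.count s "}" : Int) - (PySem.Str.count s "{" : Int)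
def pvHas (s : String) : Bool := PySem.Str.isIn "{" s
def pvSum (ls : List String) : Int := (ls.map (fun l => pvDelta (PySem.Str.strip l))).sum

-- A's collected block (before the final reverse), accumulator factored out
def pvTake : List String → Int → List String
  | [], _ => []
  | l :: rest, d =>
    let d' := d + pvDelta (PySem.Str.strip l)
    l :: (if d' ≤ 0 ∧ pvHas (PySem.Str.strip l) = true then [] else pvTake rest d')

-- B's start index, as a forward recursion on the suffix-sum condition
def pvPick : List String → Int → Int → Int → Int
  | [], _, _, st => st
  | l :: rest, d, i, st =>
      pvPick rest d (i+1)
        (if d + pvSum (l :: rest) ≤ 0 ∧ pvHas (PySem.Str.strip l) = true then i else st)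

theorem pvGoA_eq (ls : List String) : ∀ (d : Int) (acc : List String),
    pvGoA ls d acc = acc ++ pvTake ls d := by
  induction ls with
  | nil => intro d acc; simp [pvGoA, pvTake]
  | cons l rest ih =>
    intro d acc
    simp only [pvGoA, pvTake, pvDelta, pvHas]
    split
    · rfl
    · rw [ih]; simp

theorem pvPick_bounds (ls : List String) : ∀ (d i st : Int), 0 ≤ i → 0 ≤ st → st ≤ i + ls.length →
    0 ≤ pvPick ls d i st ∧ pvPick ls d i st ≤ i + ls.length := by
  induction ls with
  | nil =>
    intro d i st h0 h1 h2
    simp only [pvPick]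
    simp only [List.length_nil] at h2
    omega
  | cons l rest ih =>
    intro d i st h0 h1 h2
    simp only [List.length_cons] at h2 ⊢
    simp only [pvPick]
    split
    · have := ih d (i+1) i (by omega) h0 (by omega)
      push_cast at this ⊢; omega
    · have := ih d (i+1) st (by omega) h1 (by push_cast at h2 ⊢; omega)
      push_cast at this ⊢; omega

theorem pvPick_concat (ls : List String) (x : String) : ∀ (d i st : Int),
    pvPick (ls ++ [x]) d i st =
      if d + pvDelta (PySem.Str.strip x) ≤ 0 ∧ pvHas (PySem.Str.strip x) = true
      then i + ls.length
      else pvPick ls (d + pvDelta (PySem.Str.strip x)) i st := by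
  induction ls with
  | nil =>
    intro d i st
    simp [pvPick, pvSum]
  | cons l rest ih =>
    intro d i st
    simp only [List.cons_append, pvPick, ih]
    have hsum : d + pvSum (l :: (rest ++ [x])) =
        (d + pvDelta (PySem.Str.strip x)) + pvSum (l :: rest) := by
      simp [pvSum]; ring
    rw [hsum]
    split
    · simp only [List.length_cons]; push_cast; ring
    · rfl

-- B's foldl over the enumerated (stripped, delta) pairs computes pvPick
theorem pvFoldl_pick (total : Int) (ls : List String) : ∀ (i st : Int),
    (PySem.List.enumerate (ls.map (fun l => (PySem.Str.strip l, pvDelta (PySem.Str.strip l)))) i).foldl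
      (fun (acc : Int × Int) p =>
        (acc.1 + p.2.2,
         if total - acc.1 ≤ 0 ∧ PySem.Str.isIn "{" p.2.1 = true then p.1 else acc.2))
      (total - pvSum ls, st)
    = (total, pvPick ls 0 i st) := by
  induction ls with
  | nil => intro i st; simp [pvSum, pvPick, PySem.List.enumerate_nil]
  | cons l rest ih =>
    intro i st
    simp only [List.map_cons, PySem.List.enumerate_cons, List.foldl_cons]
    have h1 : total - pvSum (l :: rest) + pvDelta (PySem.Str.strip l) = total - pvSum rest := by
      simp [pvSum]; ring
    have h2 : total - (total - pvSum (l :: rest)) = 0 + pvSum (l :: rest) := by ring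
    rw [h1, h2, ih (i+1)]
    simp only [pvPick, pvHas]
    rfl

theorem pvAlt_eq (lines : List String) :
    find_last_json_block_py_alt lines = lines.drop (pvPick lines 0 0 0).toNat := by
  have hzip : (lines.map PySem.Str.strip).zip
      ((lines.map PySem.Str.strip).map
        (fun s => ((PySem.Str.count s "}" : Int) - (PySem.Str.count s "{" : Int))))
      = lines.map (fun l => (PySem.Str.strip l, pvDelta (PySem.Str.strip l))) := by
    rw [List.map_map, List.zip_map']
    simp [Function.comp, pvDelta]
  have htot : ((lines.map PySem.Str.strip).map
      (fun s => ((PySem.Str.count s "}" : Int) - (PySem.Str.count s "{" : Int)))).sum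
      = pvSum lines := by
    rw [List.map_map]; rfl
  simp only [find_last_json_block_py_alt, hzip, htot]
  rw [show ((0, 0) : Int × Int) = (pvSum lines - pvSum lines, (0 : Int)) by simp]
  rw [pvFoldl_pick (pvSum lines) lines 0 0]
  have hb := pvPick_bounds lines 0 0 0 le_rfl le_rfl (by simp)
  exact PySem.List.slice_from _ hb.1

theorem pvTake_reverse_eq (ls : List String) : ∀ (d : Int),
    (pvTake ls.reverse d).reverse = ls.drop (pvPick ls d 0 0).toNat := by
  induction ls using List.reverseRecOn with
  | nil => intro d; simp [pvTake]
  | append_singleton ls x ih =>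
    intro d
    rw [List.reverse_append]
    simp only [List.reverse_cons, List.reverse_nil, List.nil_append, List.cons_append]
    rw [pvPick_concat]
    simp only [pvTake]
    split
    · simp only [List.reverse_cons, List.reverse_nil, List.nil_append]
      rw [show ((0 : Int) + ls.length).toNat = ls.length by omega]
      simp
    · rw [List.reverse_cons, ih]
      have hb := pvPick_bounds ls (d + pvDelta (PySem.Str.strip x)) 0 0 le_rfl le_rfl (by simp)
      rw [List.drop_append_of_le_length (by omega)]

-- ===== VERDICT (by name: the statement is the Claim_ definition above) =====
theorem find_last_json_block_py_spec : Claim_equal_find_last_json_block_py := by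
  intro lines _
  unfold Spec_find_last_json_block_py find_last_json_block_py
  rw [pvGoA_eq, List.nil_append, pvTake_reverse_eq, pvAlt_eq]
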